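-- pv_equiv track=rewrite | github.com/kentchang/tv-mmpc | eval/util.py | clusters_to_contingency
-- ===== SOURCE A (Python) =====
-- def clusters_to_contingency(gold, auto):
--     # A table, in the form of:
--     # https://en.wikipedia.org/wiki/Rand_index#The_contingency_table
--     table = {}
--     for i, acluster in enumerate(auto):
--         aname = f"auto.{i}"
--         current = {}
--         table[aname] = current
--         for j, gcluster in enumerate(gold):
--             gname = f"gold.{j}"
--             count = len(acluster.intersection(gcluster))
--             if count > 0:
--                 current[gname] = count
--     counts_a = {}
--     for i, acluster in enumerate(auto):
--         aname = f"auto.{i}"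
--         counts_a[aname] = len(acluster)
--     counts_g = {}
--     for i, gcluster in enumerate(gold):
--         gname = f"gold.{i}"
--         counts_g[gname] = len(gcluster)
--     return table, counts_a, counts_g
-- ===== SOURCE B (Python) =====
-- def clusters_to_contingency(gold, auto):
--     # Invert gold once (element -> list of gold-cluster indices), then tally each
--     # auto cluster in one pass over its elements instead of intersecting with
--     # every gold cluster.
--     owner = {}
--     for j, gcluster in enumerate(gold):
--         for x in gcluster:
--             owner.setdefault(x, []).append(j)
--     ngold = len(gold)
--
--     def row(acluster):
--         tally = [0] * ngold
--         for x in acluster: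
--             for j in owner.get(x, ()):
--                 tally[j] += 1
--         return {f"gold.{j}": c for j, c in enumerate(tally) if c > 0}
--
--     table = {f"auto.{i}": row(a) for i, a in enumerate(auto)}
--     counts_a = {f"auto.{i}": len(a) for i, a in enumerate(auto)}
--     counts_g = {f"gold.{j}": len(g) for j, g in enumerate(gold)}
--     return table, counts_a, counts_g
-- ===== Notes on version B (the rewrite author's own statement) =====
-- stated objective: faster
-- what changed: Instead of intersecting every auto cluster with every gold cluster, B inverts gold once into an element-to-gold-cluster-indices dict and tallies each auto cluster's elements in one pass against a per-row array indexed by gold cluster.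
import Mathlib
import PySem

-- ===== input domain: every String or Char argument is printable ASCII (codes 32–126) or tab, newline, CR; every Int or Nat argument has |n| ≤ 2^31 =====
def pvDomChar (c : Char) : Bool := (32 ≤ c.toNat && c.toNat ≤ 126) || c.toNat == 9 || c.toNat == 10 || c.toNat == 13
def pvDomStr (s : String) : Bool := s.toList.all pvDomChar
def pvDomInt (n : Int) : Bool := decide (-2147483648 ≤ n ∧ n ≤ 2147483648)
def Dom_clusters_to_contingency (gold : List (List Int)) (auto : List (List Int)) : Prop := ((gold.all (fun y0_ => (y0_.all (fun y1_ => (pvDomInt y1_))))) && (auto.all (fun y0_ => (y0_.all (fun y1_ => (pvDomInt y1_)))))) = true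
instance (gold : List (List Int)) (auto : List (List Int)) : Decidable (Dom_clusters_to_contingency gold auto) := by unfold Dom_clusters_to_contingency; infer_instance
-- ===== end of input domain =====

-- B replaces A's per-(auto,gold) set intersections with a single element→gold-indices
-- index built once, tallied in one pass per auto cluster (asymptotically fewer element scans).

-- ===== PORT A =====
-- f"auto.{i}" / f"gold.{j}"
def pvFmtAuto (i : Int) : String := "auto." ++ PySem.Int.toStr i
def pvFmtGold (j : Int) : String := "gold." ++ PySem.Int.toStr j

-- inner loop of A: build `current` for one auto cluster (fresh string keys, so the
-- dict insert is an append)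
def ctgRowA (gold : List (List Int)) (a : List Int) : List (String × Int) :=
  (PySem.List.enumerate gold).foldl
    (fun cur p =>
      let count : Int := PySem.Set.len (PySem.Set.inter a p.2)
      if count > 0 then cur ++ [(pvFmtGold p.1, count)] else cur) []

def clusters_to_contingency (gold : List (List Int)) (auto : List (List Int)) :
    (List (String × List (String × Int))) × (List (String × Int)) × (List (String × Int)) :=
  ((PySem.List.enumerate auto).foldl (fun tab p => tab ++ [(pvFmtAuto p.1, ctgRowA gold p.2)]) [],
   (PySem.List.enumerate auto).foldl (fun c p => c ++ [(pvFmtAuto p.1, PySem.Set.len p.2)]) [],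
   (PySem.List.enumerate gold).foldl (fun c p => c ++ [(pvFmtGold p.1, PySem.Set.len p.2)]) [])

-- ===== PORT B =====
-- owner: element -> list of gold-cluster indices (setdefault(x, []).append(j))
def ctgOwner (gold : List (List Int)) : PySem.Dict Int (List Int) :=
  (PySem.List.enumerate gold).foldl
    (fun d p => p.2.foldl (fun d x => d.insert x (d.getD x [] ++ [p.1])) d)
    PySem.Dict.empty

-- `tally[j] += 1`; exact for 0 ≤ j < len(tally), which holds for every j in owner
def ctgBump (t : List Int) (j : Int) : List Int :=
  t.set j.toNat (PySem.List.pyGetD t j 0 + 1)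

def ctgTally (owner : PySem.Dict Int (List Int)) (ngold : Nat) (a : List Int) : List Int :=
  a.foldl (fun t x => (owner.getD x []).foldl ctgBump t) (List.replicate ngold 0)

-- {f"gold.{j}": c for j, c in enumerate(tally) if c > 0}
def ctgRowB (owner : PySem.Dict Int (List Int)) (ngold : Nat) (a : List Int) : List (String × Int) :=
  (PySem.List.enumerate (ctgTally owner ngold a)).filterMap
    (fun p => if p.2 > 0 then some (pvFmtGold p.1, p.2) else none)

def clusters_to_contingency_alt (gold : List (List Int)) (auto : List (List Int)) :
    (List (String × List (String × Int))) × (List (String × Int)) × (List (String × Int)) :=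
  ((PySem.List.enumerate auto).map (fun p => (pvFmtAuto p.1, ctgRowB (ctgOwner gold) gold.length p.2)),
   (PySem.List.enumerate auto).map (fun p => (pvFmtAuto p.1, (p.2.length : Int))),
   (PySem.List.enumerate gold).map (fun p => (pvFmtGold p.1, (p.2.length : Int))))

-- ===== PRECONDITION & SPEC =====
-- The Python arguments are lists of SETS; Pre_ only excludes gold lists with a repeated
-- element, which represent no Python input (B's index would count the duplicate twice).
def Pre_clusters_to_contingency (gold : List (List Int)) (auto : List (List Int)) : Prop :=
  ∀ c ∈ gold, c.Nodup
instance (gold : List (List Int)) (auto : List (List Int)) : Decidable (Pre_clusters_to_contingency gold auto) := by unfold Pre_clusters_to_contingency; infer_instance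
def pvWitness_clusters_to_contingency : List (List Int) × List (List Int) := ([[1, 2], [3]], [[2, 3], [9]])

def Spec_clusters_to_contingency (gold : List (List Int)) (auto : List (List Int)) (out : (List (String × List (String × Int))) × (List (String × Int)) × (List (String × Int))) : Prop := out = clusters_to_contingency_alt gold auto
instance (gold : List (List Int)) (auto : List (List Int)) (out : (List (String × List (String × Int))) × (List (String × Int)) × (List (String × Int))) : Decidable (Spec_clusters_to_contingency gold auto out) := by unfold Spec_clusters_to_contingency; infer_instance

-- ===== CLAIM (what is proved, stated in full; the proofs are below) =====
def Claim_equal_clusters_to_contingency : Prop := ∀ (gold : List (List Int)) (auto : List (List Int)), Dom_clusters_to_contingency gold auto → Pre_clusters_to_contingency gold auto → Spec_clusters_to_contingency gold auto (clusters_to_contingency gold auto)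

-- ===== LEMMAS AND PROOFS =====

-- what owner.getD x [] is: for the gold clusters at indices s, s+1, …, each index
-- repeated once per occurrence of x in that cluster
def ctgOwnSpec : List (List Int) → Int → Int → List Int
  | [], _, _ => []
  | g :: t, s, x => List.replicate (g.count x) s ++ ctgOwnSpec t (s + 1) x

theorem ctg_inner_getD (g : List Int) (j : Int) (d : PySem.Dict Int (List Int)) (x : Int) :
    (g.foldl (fun d y => d.insert y (d.getD y [] ++ [j])) d).getD x [] =
      d.getD x [] ++ List.replicate (g.count x) j := by
  induction g generalizing d with
  | nil => simp
  | cons y g ih =>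
    simp only [List.foldl_cons, ih]
    by_cases h : y = x
    · subst h
      rw [PySem.Dict.getD_insert]
      simp [List.append_assoc, ← List.replicate_succ]
    · rw [PySem.Dict.getD_insert]
      simp [h, Ne.symm h]

theorem ctg_owner_getD (l : List (List Int)) (s : Int) (d : PySem.Dict Int (List Int)) (x : Int) :
    ((PySem.List.enumerate l s).foldl
        (fun d p => p.2.foldl (fun d y => d.insert y (d.getD y [] ++ [p.1])) d) d).getD x [] =
      d.getD x [] ++ ctgOwnSpec l s x := by
  induction l generalizing s d with
  | nil => simp [ctgOwnSpec]
  | cons g t ih =>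
    rw [PySem.List.enumerate_cons, List.foldl_cons, ih, ctg_inner_getD]
    simp [ctgOwnSpec]

theorem ctgOwner_getD (gold : List (List Int)) (x : Int) :
    (ctgOwner gold).getD x [] = ctgOwnSpec gold 0 x := by
  unfold ctgOwner
  rw [ctg_owner_getD]
  rfl

theorem ctgOwnSpec_mem (l : List (List Int)) (s x j : Int) (h : j ∈ ctgOwnSpec l s x) :
    s ≤ j ∧ j < s + l.length := by
  induction l generalizing s with
  | nil => simp [ctgOwnSpec] at h
  | cons g t ih =>
    simp only [ctgOwnSpec, List.mem_append, List.mem_replicate] at h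
    rcases h with ⟨_, rfl⟩ | h
    · constructor <;> simp
    · have := ih (s + 1) h
      simp only [List.length_cons]
      constructor <;> [omega; (push_cast; omega)]

theorem ctgOwnSpec_count (l : List (List Int)) (s x : Int) (k : Nat) (hk : k < l.length) :
    (ctgOwnSpec l s x).count (s + (k : Int)) = l[k].count x := by
  induction l generalizing s k with
  | nil => simp at hk
  | cons g t ih =>
    cases k with
    | zero =>
      simp only [ctgOwnSpec, List.count_append, Nat.cast_zero, add_zero, List.count_replicate,
        beq_self_eq_true, if_pos, List.getElem_cons_zero]
      have h0 : (ctgOwnSpec t (s + 1) x).count s = 0 := by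
        rw [List.count_eq_zero]
        intro hmem
        have := ctgOwnSpec_mem t (s + 1) x s hmem
        omega
      omega
    | succ k =>
      have hne : (s : Int) + (k + 1 : Nat) ≠ s := by push_cast; omega
      simp only [ctgOwnSpec, List.count_append, List.count_replicate]
      rw [if_neg (by simpa using (Ne.symm hne))]
      have : (s : Int) + ((k + 1 : Nat) : Int) = (s + 1) + (k : Int) := by push_cast; ring
      rw [this, ih (s + 1) k (by simpa using hk)]
      simp

theorem ctg_foldl_bump_length (js : List Int) (t : List Int) :
    (js.foldl ctgBump t).length = t.length := by
  induction js generalizing t with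
  | nil => rfl
  | cons j js ih => simp [List.foldl_cons, ih, ctgBump]

theorem ctg_foldl_bump_get (js : List Int) (t : List Int) (k : Nat)
    (hb : ∀ j ∈ js, 0 ≤ j ∧ j.toNat < t.length) :
    (js.foldl ctgBump t)[k]? = t[k]?.map (· + (js.count (k : Int) : Int)) := by
  induction js generalizing t with
  | nil => cases h : t[k]? <;> simp [h]
  | cons j js ih =>
    obtain ⟨hj0, hjl⟩ := hb j (by simp)
    have hlen : (ctgBump t j).length = t.length := by simp [ctgBump]
    rw [List.foldl_cons, ih (ctgBump t j) (fun x hx => by rw [hlen]; exact hb x (by simp [hx]))]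
    unfold ctgBump
    rw [PySem.List.pyGetD_eq_getElem t 0 hj0 (by omega)]
    by_cases hk : j.toNat = k
    · have hjk : j = (k : Int) := by omega
      rw [List.getElem?_set, if_pos hk, if_pos (hk ▸ hjl)]
      have hkl : k < t.length := hk ▸ hjl
      rw [List.getElem?_eq_getElem hkl]
      simp [hjk]
      ring
    · rw [List.getElem?_set, if_neg hk]
      have hjk : j ≠ (k : Int) := by omega
      cases h : t[k]? <;> simp [h, hjk]

theorem ctg_tally_aux (gold : List (List Int)) (a : List Int) :
    ∀ (t : List Int), t.length = gold.length → ∀ (k : Nat), k < gold.length →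
      (a.foldl (fun t x => ((ctgOwner gold).getD x []).foldl ctgBump t) t)[k]? =
        t[k]?.map (· + (a.map (fun x => (gold[k]?.getD [] |>.count x : Int))).sum) := by
  induction a with
  | nil => intro t ht k hk; cases h : t[k]? <;> simp [h]
  | cons x a ih =>
    intro t ht k hk
    have hb : ∀ j ∈ (ctgOwner gold).getD x [], 0 ≤ j ∧ j.toNat < t.length := by
      intro j hj
      rw [ctgOwner_getD] at hj
      have := ctgOwnSpec_mem gold 0 x j hj
      omega
    have hlen : (((ctgOwner gold).getD x []).foldl ctgBump t).length = gold.length := by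
      rw [ctg_foldl_bump_length, ht]
    rw [List.foldl_cons, ih _ hlen k hk, ctg_foldl_bump_get _ _ _ hb, ctgOwner_getD]
    have hc : (ctgOwnSpec gold 0 x).count (k : Int) = gold[k].count x := by
      have := ctgOwnSpec_count gold 0 x k hk
      simpa using this
    rw [hc]
    cases h : t[k]? with
    | none => simp
    | some v =>
      simp only [Option.map_some, List.map_cons, List.sum_cons, Option.some.injEq]
      rw [List.getElem?_eq_getElem hk]
      simp only [Option.getD_some]
      ring

theorem ctg_tally_length (gold : List (List Int)) (a : List Int) :
    ∀ (t : List Int),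
      (a.foldl (fun t x => ((ctgOwner gold).getD x []).foldl ctgBump t) t).length = t.length := by
  induction a with
  | nil => intro t; rfl
  | cons x a ih => intro t; rw [List.foldl_cons, ih, ctg_foldl_bump_length]

theorem ctgTally_spec (gold : List (List Int)) (a : List Int)
    (hg : ∀ c ∈ gold, c.Nodup) :
    ctgTally (ctgOwner gold) gold.length a =
      gold.map (fun g => (a.countP (fun x => g.contains x) : Int)) := by
  have hlen : (ctgTally (ctgOwner gold) gold.length a).length = gold.length := by
    unfold ctgTally; rw [ctg_tally_length]; simp
  apply List.ext_getElem?
  intro k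
  by_cases hk : k < gold.length
  · unfold ctgTally
    rw [ctg_tally_aux gold a (List.replicate gold.length 0) (by simp) k hk]
    simp only [List.getElem?_map, List.getElem?_eq_getElem hk,
      List.getElem?_eq_getElem (by simpa using hk : k < (List.replicate gold.length (0:Int)).length),
      List.getElem_replicate, Option.getD_some, Option.map_some, Option.some.injEq]
    have hcong : a.map (fun x => ((gold[k]).count x : Int)) =
        a.map (fun x => if gold[k].contains x then (1:Int) else 0) := by
      apply List.map_congr_left
      intro x _
      by_cases hx : x ∈ gold[k]
      · rw [List.count_eq_one_of_mem (hg _ (List.getElem_mem hk)) hx, if_pos (by simpa using hx)]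
        simp
      · rw [List.count_eq_zero_of_not_mem hx, if_neg (by simpa using hx)]
        simp
    rw [hcong, PySem.List.sum_map_ite_one_zero]
    ring
  · rw [List.getElem?_eq_none (by omega : (ctgTally (ctgOwner gold) gold.length a).length ≤ k),
        List.getElem?_eq_none (by simp; omega)]

theorem ctg_row_fold (a : List Int) (l : List (Int × List Int)) (acc : List (String × Int)) :
    l.foldl (fun cur p =>
      let count := PySem.Set.len (PySem.Set.inter a p.2)
      if count > 0 then cur ++ [(pvFmtGold p.1, count)] else cur) acc
    = acc ++ l.filterMap (fun p =>
        if PySem.Set.len (PySem.Set.inter a p.2) > 0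
        then some (pvFmtGold p.1, PySem.Set.len (PySem.Set.inter a p.2)) else none) := by
  induction l generalizing acc with
  | nil => simp
  | cons p l ih =>
    simp only [List.foldl_cons, List.filterMap_cons]
    split_ifs with h
    · rw [ih]
      simp
    · exact ih acc

theorem ctg_enumerate_map {α β : Type} (f : α → β) (l : List α) (s : Int) :
    PySem.List.enumerate (l.map f) s = (PySem.List.enumerate l s).map (fun p => (p.1, f p.2)) := by
  induction l generalizing s with
  | nil => simp
  | cons x l ih => simp [PySem.List.enumerate_cons, ih]

theorem ctgRow_eq (gold : List (List Int)) (a : List Int) (hg : ∀ c ∈ gold, c.Nodup) :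
    ctgRowA gold a = ctgRowB (ctgOwner gold) gold.length a := by
  unfold ctgRowA ctgRowB
  rw [ctg_row_fold a, ctgTally_spec gold a hg, ctg_enumerate_map, List.filterMap_map]
  simp only [List.nil_append]
  apply List.filterMap_congr
  intro p _
  have hce : PySem.Set.len (PySem.Set.inter a p.2) = (a.countP (fun x => p.2.contains x) : Int) := by
    simp [PySem.Set.len, PySem.Set.inter, List.countP_eq_length_filter]
  simp only [Function.comp]
  rw [hce]

-- ===== VERDICT (by name: the statement is the Claim_ definition above) =====
theorem clusters_to_contingency_spec : Claim_equal_clusters_to_contingency := by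
  intro gold auto _ hpre
  unfold Spec_clusters_to_contingency clusters_to_contingency clusters_to_contingency_alt
  rw [PySem.List.foldl_append_singleton_eq_map, PySem.List.foldl_append_singleton_eq_map,
    PySem.List.foldl_append_singleton_eq_map]
  refine congrArg₂ _ ?_ (congrArg₂ _ ?_ ?_)
  · simp only [List.nil_append]
    exact List.map_congr_left (fun p _ => by rw [ctgRow_eq gold _ hpre])
  · simp [PySem.Set.len]
  · simp [PySem.Set.len]
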